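-- pv_equiv track=rewrite | github.com/Deeathex/DataMining_SentimentAnalysis | data_processing/text_processing/feature_extraction.py | identify_hashtags
-- ===== SOURCE A (Python) =====
-- def identify_hashtags(text):
--     result = []
--     words = text.split(" ")
--     for word in words:
--         chars = list(word)
--         if len(chars) > 0 and chars[0] == '#':
--             result.append("".join(chars[1:]))
--     return result
-- ===== SOURCE B (Python) =====
-- def identify_hashtags(text):
--     # Single pass over the characters: no split, no per-word list building.
--     result = []
--     current = None   # chars captured after a leading '#', or None
--     start = True     # are we at the start of a (space-delimited) token?
--     for c in text:
--         if c == ' ':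
--             if current is not None:
--                 result.append(current)
--                 current = None
--             start = True
--         else:
--             if start and c == '#':
--                 current = ''
--             elif current is not None:
--                 current += c
--             start = False
--     if current is not None:
--         result.append(current)
--     return result
-- ===== Notes on version B (the rewrite author's own statement) =====
-- stated objective: alternative
-- what changed: Replaces split-into-words plus per-word list/slice/join with a single character-level state-machine pass (token-start flag and an optional capture buffer), never materialising the word list.
import Mathlib
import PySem

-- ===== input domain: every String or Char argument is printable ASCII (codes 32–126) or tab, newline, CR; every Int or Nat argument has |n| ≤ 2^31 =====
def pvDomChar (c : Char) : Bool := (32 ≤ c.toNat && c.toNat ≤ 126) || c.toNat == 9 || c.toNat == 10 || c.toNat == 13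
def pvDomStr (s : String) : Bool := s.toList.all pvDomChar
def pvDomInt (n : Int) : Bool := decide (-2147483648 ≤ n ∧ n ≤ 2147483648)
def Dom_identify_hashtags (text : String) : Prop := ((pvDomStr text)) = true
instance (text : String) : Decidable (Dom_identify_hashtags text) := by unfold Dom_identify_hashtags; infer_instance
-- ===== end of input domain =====

-- B replaces split-into-words + per-word slicing by one character-level state-machine pass (alternative decomposition, same cost).


-- ===== PORT A =====
def identify_hashtags (text : String) : List String :=
  let words := PySem.Chars.splitOn text.toList [' ']
  words.foldl (fun result word =>
    let chars := word
    if 0 < chars.length ∧ PySem.List.pyGet? chars 0 = some '#' then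
      result ++ [String.mk (PySem.List.slice chars (some 1) none)]
    else result) []

-- ===== PORT B =====
-- state: (result, current capture after a '#', at-token-start flag)
def pvAltStep : List (List Char) × Option (List Char) × Bool → Char →
    List (List Char) × Option (List Char) × Bool
  | (res, cur, start), c =>
    if c = ' ' then
      ((match cur with
        | some w => res ++ [w]
        | none => res), none, true)
    else if start = true ∧ c = '#' then (res, some [], false)
    else
      match cur with
      | some w => (res, some (w ++ [c]), false)
      | none => (res, none, false)

def identify_hashtags_alt (text : String) : List String :=
  let st := text.toList.foldl pvAltStep ([], none, true)
  (match st.2.1 with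
   | some w => st.1 ++ [w]
   | none => st.1).map String.mk

-- ===== PRECONDITION & SPEC =====
def Spec_identify_hashtags (text : String) (out : List String) : Prop := out = identify_hashtags_alt text
instance (text : String) (out : List String) : Decidable (Spec_identify_hashtags text out) := by unfold Spec_identify_hashtags; infer_instance

-- ===== CLAIM (what is proved, stated in full; the proofs are below) =====
def Claim_equal_identify_hashtags : Prop := ∀ (text : String), Dom_identify_hashtags text → Spec_identify_hashtags text (identify_hashtags text)

-- ===== LEMMAS AND PROOFS =====

-- reference tokenisation: split on single space, keeping empty pieces
def pvTokens : List Char → List (List Char)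
  | [] => [[]]
  | c :: cs =>
    if c = ' ' then [] :: pvTokens cs
    else
      match pvTokens cs with
      | t :: ts => (c :: t) :: ts
      | [] => [[c]]

lemma pvTokens_ne_nil (cs : List Char) : pvTokens cs ≠ [] := by
  cases cs with
  | nil => simp [pvTokens]
  | cons c cs =>
    simp only [pvTokens]
    split <;> [simp; (split <;> simp)]

lemma pvTokens_space_cons (cs : List Char) : pvTokens (' ' :: cs) = [] :: pvTokens cs := by
  simp [pvTokens]

lemma splitOn_go_eq_tokens (l : List Char) : ∀ (fuel : Nat) (cur : List Char) (acc : List (List Char)),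
    l.length ≤ fuel →
    PySem.Chars.splitOn.go [' '] fuel l cur acc =
      acc.reverse ++ (match pvTokens l with
        | t :: ts => (cur.reverse ++ t) :: ts
        | [] => [cur.reverse]) := by
  induction l with
  | nil =>
    intro fuel cur acc _
    cases fuel <;> simp [PySem.Chars.splitOn.go, pvTokens]
  | cons c cs ih =>
    intro fuel cur acc hf
    cases fuel with
    | zero => simp at hf
    | succ f =>
      simp only [List.length_cons, Nat.succ_le_succ_iff] at hf
      by_cases hc : c = ' '
      · subst hc
        rw [PySem.Chars.splitOn.go]
        simp only [List.isPrefixOf, BEq.rfl, Bool.true_and, List.isPrefixOf_nil_left,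
          if_pos, List.length_singleton, List.drop_one, List.tail_cons]
        rw [ih f [] (cur.reverse :: acc) hf]
        cases hts : pvTokens cs with
        | nil => exact absurd hts (pvTokens_ne_nil cs)
        | cons t ts => simp [pvTokens, hts]
      · rw [PySem.Chars.splitOn.go]
        have hpre : List.isPrefixOf [' '] (c :: cs) = false := by
          simp [List.isPrefixOf]
          intro h; exact absurd h.symm hc
        simp only [hpre, Bool.false_eq_true, if_false]
        rw [ih f (c :: cur) acc hf]
        cases hts : pvTokens cs with
        | nil => exact absurd hts (pvTokens_ne_nil cs)
        | cons t ts => simp [pvTokens, hts, hc]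

lemma splitOn_space_eq_tokens (cs : List Char) :
    PySem.Chars.splitOn cs [' '] = pvTokens cs := by
  rw [PySem.Chars.splitOn, splitOn_go_eq_tokens cs (cs.length + 1) [] [] (by omega)]
  cases hts : pvTokens cs with
  | nil => exact absurd hts (pvTokens_ne_nil cs)
  | cons t ts => simp

-- char-level version of A's fold step
def pvStepA (res : List (List Char)) (w : List Char) : List (List Char) :=
  match w with
  | '#' :: rest => res ++ [rest]
  | _ => res

lemma stepA_eq (res : List String) (w : List Char) :
    (if 0 < w.length ∧ PySem.List.pyGet? w 0 = some '#' then
        res ++ [String.mk (PySem.List.slice w (some 1) none)]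
      else res) =
      (match w with
        | '#' :: rest => res ++ [String.mk rest]
        | _ => res) := by
  match w with
  | [] => simp
  | c :: rest =>
    by_cases hc : c = '#'
    · subst hc
      rw [if_pos]
      · rw [PySem.List.slice_from_one]; simp
      · refine ⟨by simp, ?_⟩
        simp [PySem.List.pyGet?, PySem.List.pyIdx?]
    · rw [if_neg]
      · cases c <;> simp_all
      · simp [PySem.List.pyGet?, PySem.List.pyIdx?, hc]

-- A's fold commutes with the List Char → String conversion
lemma foldA_map (ts : List (List Char)) : ∀ (res : List (List Char)),
    ts.foldl (fun r w =>
        match w with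
        | '#' :: rest => r ++ [String.mk rest]
        | _ => r) (res.map String.mk) =
      (ts.foldl pvStepA res).map String.mk := by
  induction ts with
  | nil => intro res; simp
  | cons w ts ih =>
    intro res
    simp only [List.foldl_cons]
    match w with
    | [] => exact ih res
    | ' ' :: rest => simp only [pvStepA]; exact ih res
    | '#' :: rest =>
      have := ih (res ++ [rest])
      simp only [pvStepA, List.map_append] at this ⊢
      simpa using this
    | c :: rest =>
      simp only [pvStepA]
      by_cases hc : c = '#'
      · subst hc; have := ih (res ++ [rest]); simp only [List.map_append] at this ⊢; simpa using this
      · have hs : (match c :: rest with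
            | '#' :: rest => res.map String.mk ++ [String.mk rest]
            | _ => res.map String.mk) = res.map String.mk := by
          cases c; simp_all
        have hs2 : (match c :: rest with
            | '#' :: rest => res ++ [rest]
            | _ => res) = res := by
          cases c; simp_all
        rw [hs, hs2]; exact ih res

lemma pvAltStep_space (res : List (List Char)) (cur : Option (List Char)) (start : Bool) :
    pvAltStep (res, cur, start) ' ' =
      ((match cur with | some w => res ++ [w] | none => res), none, true) := by
  simp [pvAltStep]

lemma pvAltStep_hash (res : List (List Char)) :
    pvAltStep (res, none, true) '#' = (res, some [], false) := by
  simp [pvAltStep]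

-- finalisation of B's state
def pvFin (st : List (List Char) × Option (List Char) × Bool) : List (List Char) :=
  match st.2.1 with
  | some w => st.1 ++ [w]
  | none => st.1

-- core invariant: B's scan, started from each reachable state shape, computes A's fold over the tokens
lemma key (cs : List Char) :
    (∀ res : List (List Char),
        pvFin (cs.foldl pvAltStep (res, none, true)) = (pvTokens cs).foldl pvStepA res) ∧
    (∀ (res : List (List Char)) (w t : List Char) (ts : List (List Char)),
        pvTokens cs = t :: ts →
        pvFin (cs.foldl pvAltStep (res, some w, false)) = ts.foldl pvStepA (res ++ [w ++ t])) ∧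
    (∀ (res : List (List Char)) (t : List Char) (ts : List (List Char)),
        pvTokens cs = t :: ts →
        pvFin (cs.foldl pvAltStep (res, none, false)) = ts.foldl pvStepA res) := by
  induction cs with
  | nil =>
    refine ⟨?_, ?_, ?_⟩
    · intro res; simp [pvFin, pvTokens, pvStepA]
    · intro res w t ts h
      simp only [pvTokens, List.cons.injEq] at h
      obtain ⟨ht, hts⟩ := h
      simp [pvFin, ← ht, ← hts, pvStepA]
    · intro res t ts h
      simp only [pvTokens, List.cons.injEq] at h
      simp [pvFin, ← h.2]
  | cons c cs ih =>
    obtain ⟨ih1, ih2, ih3⟩ := ih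
    refine ⟨?_, ?_, ?_⟩
    · intro res
      by_cases hsp : c = ' '
      · subst hsp
        simp only [List.foldl_cons, pvAltStep_space, pvTokens, if_pos rfl, List.foldl_cons]
        rw [ih1 res]
        simp [pvStepA]
      · by_cases hh : c = '#'
        · subst hh
          simp only [List.foldl_cons, pvAltStep_hash]
          cases hts : pvTokens cs with
          | nil => exact absurd hts (pvTokens_ne_nil cs)
          | cons t ts =>
            rw [ih2 res [] t ts hts]
            simp [pvTokens, hts, pvStepA]
        · have hstep : pvAltStep (res, none, true) c = (res, none, false) := by
            simp [pvAltStep, hsp, hh]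
          simp only [List.foldl_cons, hstep]
          cases hts : pvTokens cs with
          | nil => exact absurd hts (pvTokens_ne_nil cs)
          | cons t ts =>
            rw [ih3 res t ts hts]
            have : pvTokens (c :: cs) = (c :: t) :: ts := by simp [pvTokens, hts, hsp]
            rw [this]
            have : pvStepA res (c :: t) = res := by
              simp only [pvStepA]
              cases c; simp_all
            simp [this]
    · intro res w t ts h
      by_cases hsp : c = ' '
      · subst hsp
        rw [pvTokens_space_cons] at h
        injection h with ht hts
        simp only [List.foldl_cons, pvAltStep_space]
        rw [ih1 (res ++ [w])]
        simp [← ht, ← hts]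
      · have hstep : pvAltStep (res, some w, false) c = (res, some (w ++ [c]), false) := by
          simp [pvAltStep, hsp]
        simp only [List.foldl_cons, hstep]
        cases hts : pvTokens cs with
        | nil => exact absurd hts (pvTokens_ne_nil cs)
        | cons t' ts' =>
          rw [ih2 res (w ++ [c]) t' ts' hts]
          have hct : pvTokens (c :: cs) = (c :: t') :: ts' := by simp [pvTokens, hts, hsp]
          injection hct.symm.trans h with h1 h2
          subst h1; subst h2
          simp [List.append_assoc]
    · intro res t ts h
      by_cases hsp : c = ' '
      · subst hsp
        rw [pvTokens_space_cons] at h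
        injection h with ht hts
        simp only [List.foldl_cons, pvAltStep_space]
        rw [ih1 res]
        simp [← hts]
      · have hstep : pvAltStep (res, none, false) c = (res, none, false) := by
          simp [pvAltStep, hsp]
        simp only [List.foldl_cons, hstep]
        cases hts : pvTokens cs with
        | nil => exact absurd hts (pvTokens_ne_nil cs)
        | cons t' ts' =>
          rw [ih3 res t' ts' hts]
          have hct : pvTokens (c :: cs) = (c :: t') :: ts' := by simp [pvTokens, hts, hsp]
          injection hct.symm.trans h with h1 h2
          subst h2
          rfl

lemma foldA_if_eq (ts : List (List Char)) : ∀ (res : List String),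
    ts.foldl (fun result word =>
        let chars := word
        if 0 < chars.length ∧ PySem.List.pyGet? chars 0 = some '#' then
          result ++ [String.mk (PySem.List.slice chars (some 1) none)]
        else result) res =
      ts.foldl (fun r w =>
        match w with
        | '#' :: rest => r ++ [String.mk rest]
        | _ => r) res := by
  induction ts with
  | nil => intro res; rfl
  | cons w ts ih =>
    intro res
    rw [List.foldl_cons, List.foldl_cons]
    show ts.foldl _ (if 0 < w.length ∧ PySem.List.pyGet? w 0 = some '#' then
          res ++ [String.mk (PySem.List.slice w (some 1) none)] else res) = _
    rw [stepA_eq]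
    exact ih _

theorem identify_hashtags_spec : Claim_equal_identify_hashtags := by
  intro text _
  show identify_hashtags text = identify_hashtags_alt text
  unfold identify_hashtags identify_hashtags_alt
  simp only [splitOn_space_eq_tokens]
  have h1 := (key text.toList).1 ([] : List (List Char))
  rw [foldA_if_eq]
  have h2 := foldA_map (pvTokens text.toList) []
  simp only [List.map_nil] at h2
  rw [h2, ← h1]
  rfl
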